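-- pv_equiv track=rewrite | github.com/hopo/pythonruby_ot | Programmers/Competions_2018/Quiz/quizB-02.py | solution
-- ===== SOURCE A (Python) =====
-- def solution(no, works):
-- 	total = sum(works) - no
--
-- 	each = total // len(works)
-- 	remainder = total % len(works)
--
-- 	result = 0
-- 	for i in works:
-- 		if remainder > 0:
-- 			result += pow(each + 1, 2)
-- 			remainder -= 1
-- 		else:
-- 			result += pow(each, 2)
--
-- 	return result
-- ===== SOURCE B (Python) =====
-- def solution(no, works):
--     n = len(works)
--     total = sum(works) - no
--     each, remainder = divmod(total, n)
--     return remainder * (each + 1) ** 2 + (n - remainder) * each ** 2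
-- ===== Notes on version B (the rewrite author's own statement) =====
-- stated objective: faster
-- what changed: Replaces the per-worker conditional loop by the closed form remainder*(each+1)^2 + (n-remainder)*each^2 computed via divmod.
import Mathlib
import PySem

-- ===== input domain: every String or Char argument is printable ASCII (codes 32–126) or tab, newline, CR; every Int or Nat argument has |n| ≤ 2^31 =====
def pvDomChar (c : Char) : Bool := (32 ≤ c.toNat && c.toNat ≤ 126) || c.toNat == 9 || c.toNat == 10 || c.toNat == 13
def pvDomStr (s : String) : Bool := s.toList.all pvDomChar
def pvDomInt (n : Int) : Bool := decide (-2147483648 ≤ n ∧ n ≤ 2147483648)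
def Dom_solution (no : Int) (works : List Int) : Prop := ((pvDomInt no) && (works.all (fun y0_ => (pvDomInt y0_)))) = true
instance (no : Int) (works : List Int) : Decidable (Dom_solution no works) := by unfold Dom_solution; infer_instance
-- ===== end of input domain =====

-- B replaces A's per-worker loop by the closed form r*(each+1)^2 + (n-r)*each^2; return value only.

-- ===== PORT A =====
def solution (no : Int) (works : List Int) : Int :=
  let total := (works.foldl (· + ·) 0) - no
  let each := PySem.Int.floordiv total (works.length : Int)
  let remainder := PySem.Int.mod total (works.length : Int)
  let st := works.foldl
    (fun (st : Int × Int) _ =>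
      if st.2 > 0 then (st.1 + (each + 1) ^ 2, st.2 - 1)
      else (st.1 + each ^ 2, st.2)) (0, remainder)
  st.1

-- ===== PORT B =====
def solution_alt (no : Int) (works : List Int) : Int :=
  let n : Int := works.length
  let total := (works.foldl (· + ·) 0) - no
  let each := PySem.Int.floordiv total n
  let remainder := PySem.Int.mod total n
  remainder * (each + 1) ^ 2 + (n - remainder) * each ^ 2

-- ===== PRECONDITION & SPEC =====
-- Pre_ excludes the empty list, on which Python A raises ZeroDivisionError (B raises too).
def Pre_solution (no : Int) (works : List Int) : Prop := works ≠ []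
instance (no : Int) (works : List Int) : Decidable (Pre_solution no works) := by unfold Pre_solution; infer_instance
def pvWitness_solution : Int × List Int := (3, [5, 7, 2])

def Spec_solution (no : Int) (works : List Int) (out : Int) : Prop := out = solution_alt no works
instance (no : Int) (works : List Int) (out : Int) : Decidable (Spec_solution no works out) := by unfold Spec_solution; infer_instance

-- ===== CLAIM (what is proved, stated in full; the proofs are below) =====
def Claim_equal_solution : Prop := ∀ (no : Int) (works : List Int), Dom_solution no works → Pre_solution no works → Spec_solution no works (solution no works)

-- ===== LEMMAS AND PROOFS =====

-- Loop invariant: A's fold adds (each+1)^2 for the first (min r len) steps and each^2 after.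
theorem solution_loop_eq (e : Int) (l : List Int) (r acc : Int) (hr : 0 ≤ r) :
    (l.foldl (fun (st : Int × Int) _ =>
      if st.2 > 0 then (st.1 + (e + 1) ^ 2, st.2 - 1)
      else (st.1 + e ^ 2, st.2)) (acc, r)).1
    = acc + (min r (l.length : Int)) * (e + 1) ^ 2
        + ((l.length : Int) - min r (l.length : Int)) * e ^ 2 := by
  induction l generalizing r acc with
  | nil =>
    have : min r (0:Int) = 0 := by omega
    simp [this]
  | cons x xs ih =>
    simp only [List.foldl_cons, List.length_cons]
    by_cases h : r > 0
    · rw [if_pos h, ih _ _ (by omega)]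
      have h1 : min (r - 1) (xs.length : Int) = min r ((xs.length : Int) + 1) - 1 := by omega
      push_cast
      rw [h1]; ring
    · rw [if_neg h, ih _ _ hr]
      have h0 : r = 0 := le_antisymm (by omega) hr
      subst h0
      have h1 : min (0 : Int) ((xs.length : Int)) = 0 := by omega
      have h2 : min (0 : Int) ((xs.length : Int) + 1) = 0 := by omega
      push_cast
      rw [h1, h2]; ring

-- ===== VERDICT (by name: the statement is the Claim_ definition above) =====
theorem solution_spec : Claim_equal_solution := by
  intro no works _ hpre
  unfold Spec_solution solution solution_alt
  simp only []
  have hlen : 0 < (works.length : Int) := by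
    have : works.length ≠ 0 := by simpa [List.length_eq_zero_iff] using hpre
    omega
  set total := (works.foldl (· + ·) 0) - no with htotal
  have hmod0 : 0 ≤ PySem.Int.mod total (works.length : Int) := PySem.Int.mod_nonneg total hlen
  have hmodlt : PySem.Int.mod total (works.length : Int) < (works.length : Int) := PySem.Int.mod_lt total hlen
  rw [solution_loop_eq _ _ _ _ hmod0]
  have hmin : min (PySem.Int.mod total (works.length : Int)) (works.length : Int)
      = PySem.Int.mod total (works.length : Int) := by omega
  rw [hmin]; ring
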